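-- pv_equiv track=rewrite | github.com/jlumpe/pycyt-old | pycyt/util.py | cycle_adjacent
-- ===== SOURCE A (Python) =====
-- import collections
--
-- def cycle_adjacent(seq, n):
-- 	"""
-- 	For a given sequence (taken to be cyclical), yields all n-tuples of
-- 	consecutive elements. For example, cycle_adjacent(range(5), 3) returns
-- 	[(0, 1, 2), (1, 2, 3), (2, 3, 4), (3, 4, 0), (4, 0, 1)].
-- 	Yields nothing for sequences of length less than n.
-- 	"""
-- 	i = iter(seq)
-- 	start = collections.deque(maxlen=n)
-- 	for j in range(n):
-- 		try:
-- 			start.append(next(i))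
-- 		except StopIteration:
-- 			return
-- 	q = collections.deque(start, maxlen=n)
-- 	while True:
-- 		yield tuple(q)
-- 		try:
-- 			e = next(i)
-- 		except StopIteration:
-- 			break
-- 		q.popleft()
-- 		q.append(e)
-- 	for j in range(n-1):
-- 		q.popleft()
-- 		q.append(start.popleft())
-- 		yield tuple(q)
-- ===== SOURCE B (Python) =====
-- def cycle_adjacent(seq, n):
-- 	"""
-- 	For a given sequence (taken to be cyclical), yields all n-tuples of
-- 	consecutive elements. Yields nothing for sequences of length less than n.
-- 	"""
-- 	lst = list(seq)
-- 	L = len(lst)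
-- 	if L < n:
-- 		return
-- 	ext = lst + lst[:n - 1]
-- 	for i in range(L):
-- 		yield tuple(ext[i:i + n])
-- ===== Notes on version B (the rewrite author's own statement) =====
-- stated objective: simpler
-- what changed: B materializes the sequence, appends the first n-1 elements once, and yields each window as a direct slice of that extended list, replacing A's deque sliding window with its separate two-phase wrap-around handling and running state.
-- outside the precondition, e.g. on cycle_adjacent([], 0): A returns [()], B returns []
import Mathlib
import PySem

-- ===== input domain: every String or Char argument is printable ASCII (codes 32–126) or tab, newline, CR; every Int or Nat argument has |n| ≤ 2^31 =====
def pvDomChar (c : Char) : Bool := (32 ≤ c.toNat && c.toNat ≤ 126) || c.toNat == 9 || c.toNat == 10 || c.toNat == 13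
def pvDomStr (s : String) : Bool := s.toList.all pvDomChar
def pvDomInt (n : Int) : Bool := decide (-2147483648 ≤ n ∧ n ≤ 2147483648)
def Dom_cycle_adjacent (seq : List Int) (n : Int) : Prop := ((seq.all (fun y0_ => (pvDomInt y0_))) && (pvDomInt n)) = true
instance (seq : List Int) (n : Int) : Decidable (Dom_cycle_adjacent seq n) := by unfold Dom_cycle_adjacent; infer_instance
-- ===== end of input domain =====

-- B replaces A's deque sliding window (main phase + separate wrap-around phase) by
-- direct modular indexing into the materialized list; objective: simpler.
-- Both are generators; equivalence is about the produced list of tuples.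

-- ===== PORT A =====
-- A's loop: yield current window q, then slide it by popleft/append over the remaining
-- iterator elements (`rest`), then over the first n-1 saved start elements (`st`).
def caMain (q : List Int) (rest : List Int) (st : List Int) : List (List Int) :=
  match rest with
  | [] =>
    -- while-loop ends: final yield of q, then the wrap-around for-loop over st
    q :: (match st with
          | [] => []
          | _ :: _ => (List.scanl (fun q e => q.drop 1 ++ [e]) q st).drop 1)
  | e :: rs => q :: caMain (q.drop 1 ++ [e]) rs st

-- guard `n < 0` totalizes deque(maxlen=n<0) (Python raises ValueError there; outside Pre_)
def cycle_adjacent (seq : List Int) (n : Int) : List (List Int) :=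
  if n < 0 then []
  else
    let m := n.toNat
    if seq.length < m then []   -- `start.append(next(i))` hits StopIteration: yield nothing
    else caMain (seq.take m) (seq.drop m) (seq.take (m - 1))

-- ===== PORT B =====
def cycle_adjacent_alt (seq : List Int) (n : Int) : List (List Int) :=
  let L := seq.length
  if (L : Int) < n then []
  else
    let ext := seq ++ PySem.List.slice seq none (some (n - 1))
    (List.range L).map (fun (i : Nat) => PySem.List.slice ext (some ((i : Int))) (some ((i : Int) + n)))

-- ===== PRECONDITION & SPEC =====
-- Pre_ excludes n ≤ 0: there A raises (ValueError for n < 0; IndexError for n = 0 on any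
-- non-empty input), except on ([], 0) where A's single empty tuple is an accident of the
-- first unconditional yield; B naturally yields nothing there.
def Pre_cycle_adjacent (seq : List Int) (n : Int) : Prop := 1 ≤ n
instance (seq : List Int) (n : Int) : Decidable (Pre_cycle_adjacent seq n) := by unfold Pre_cycle_adjacent; infer_instance

def pvWitness_cycle_adjacent : List Int × Int := ([1, 2, 3, 4], 2)

def Spec_cycle_adjacent (seq : List Int) (n : Int) (out : List (List Int)) : Prop := out = cycle_adjacent_alt seq n
instance (seq : List Int) (n : Int) (out : List (List Int)) : Decidable (Spec_cycle_adjacent seq n out) := by unfold Spec_cycle_adjacent; infer_instance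

-- ===== CLAIM (what is proved, stated in full; the proofs are below) =====
def Claim_equal_cycle_adjacent : Prop := ∀ (seq : List Int) (n : Int), Dom_cycle_adjacent seq n → Pre_cycle_adjacent seq n → Spec_cycle_adjacent seq n (cycle_adjacent seq n)

-- ===== LEMMAS AND PROOFS =====

-- caMain is a scanl of the sliding step over all fed elements (rest then st).
theorem caMain_eq_scanl (q rest st : List Int) :
    caMain q rest st = List.scanl (fun q e => q.drop 1 ++ [e]) q (rest ++ st) := by
  induction rest generalizing q with
  | nil =>
    cases st with
    | nil => simp [caMain]
    | cons s ss => simp [caMain, List.scanl]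
  | cons e rs ih => simp [caMain, List.scanl, ih]

-- sliding the step once over a take-window advances the window by one
theorem step_window (ys : List Int) (m : Nat) (hm : 1 ≤ m) (hlen : m + 1 ≤ ys.length) :
    (ys.take m).drop 1 ++ [ys.getD m 0] = (ys.drop 1).take m := by
  cases ys with
  | nil => simp at hlen
  | cons a as =>
    cases m with
    | zero => omega
    | succ k =>
      simp only [List.take_succ_cons, List.drop_succ_cons, List.drop_zero, List.getD]
      have hk : k < as.length := by simp at hlen; omega
      rw [List.take_add_one]
      simp [List.getElem?_eq_getElem hk]

theorem scanl_windows (r : Nat) : ∀ (ys : List Int) (m : Nat), 1 ≤ m → m + r ≤ ys.length →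
    List.scanl (fun q e => q.drop 1 ++ [e]) (ys.take m) ((ys.drop m).take r) =
      (List.range (r + 1)).map (fun k => (ys.drop k).take m) := by
  induction r with
  | zero => intro ys m _ _; simp [List.scanl]
  | succ r ih =>
    intro ys m hm hlen
    have hmlt : m < ys.length := by omega
    have h1 : (ys.drop 1).drop m = ys.drop (m + 1) := by
      rw [List.drop_drop, Nat.add_comm]
    have hd : (ys.drop m).take (r + 1) = ys.getD m 0 :: ((ys.drop 1).drop m).take r := by
      have h0 : ys.drop m = ys.getD m 0 :: ys.drop (m + 1) := by
        rw [List.drop_eq_getElem_cons hmlt]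
        simp [List.getD, List.getElem?_eq_getElem hmlt]
      rw [h0, h1, List.take_succ_cons]
    rw [hd, List.scanl_cons]
    rw [step_window ys m hm (by omega)]
    rw [ih (ys.drop 1) m hm (by simp; omega)]
    have hr : List.range (r + 1 + 1) = 0 :: (List.range (r + 1)).map (fun k => k + 1) := by
      rw [List.range_succ_eq_map]
    rw [hr]
    simp only [List.map_cons, List.map_map, Function.comp_def, List.drop_drop, List.drop_zero]
    congr 1
    apply List.map_congr_left
    intro k _
    congr 2
    omega

-- a window of the extended list is the same window of the doubled list
theorem ext_window (seq : List Int) (m i : Nat) (hi : i < seq.length) :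
    ((seq ++ seq.take (m - 1)).drop i).take m = ((seq ++ seq).drop i).take m := by
  have h : seq ++ seq.take (m - 1) = (seq ++ seq).take (seq.length + (m - 1)) := by
    rw [List.take_append]
    congr 1
    · exact (List.take_of_length_le (by omega)).symm
    · congr 1
      omega
  rw [h, List.drop_take, List.take_take]
  congr 1
  omega

-- the fed elements are exactly a window of the doubled list
theorem fed_eq (seq : List Int) (m : Nat) (hm : 1 ≤ m) (hmL : m ≤ seq.length) :
    seq.drop m ++ seq.take (m - 1) = ((seq ++ seq).drop m).take (seq.length - 1) := by
  rw [List.drop_append_of_le_length (by omega)]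
  rw [List.take_append]
  congr 1
  · rw [List.take_of_length_le (by simp; omega)]
  · congr 1
    simp
    omega

-- ===== VERDICT (by name: the statement is the Claim_ definition above) =====
theorem cycle_adjacent_spec : Claim_equal_cycle_adjacent := by
  intro seq n _ hpre
  unfold Spec_cycle_adjacent cycle_adjacent cycle_adjacent_alt
  have hn0 : ¬ n < 0 := by unfold Pre_cycle_adjacent at hpre; omega
  simp only [if_neg hn0]
  set m := n.toNat with hmdef
  have hm1 : 1 ≤ m := by unfold Pre_cycle_adjacent at hpre; omega
  by_cases hlt : seq.length < m
  · have : (seq.length : Int) < n := by omega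
    simp [hlt, this]
  · have hnlt : ¬ (seq.length : Int) < n := by omega
    simp only [if_neg hlt, if_neg hnlt]
    have hslice : PySem.List.slice seq none (some (n - 1)) = seq.take (m - 1) := by
      rw [PySem.List.slice_to (hb := by omega)]
      congr 1
      omega
    rw [hslice]
    have hmL : m ≤ seq.length := by omega
    rw [caMain_eq_scanl]
    rw [fed_eq seq m hm1 hmL]
    have htake : seq.take m = (seq ++ seq).take m :=
      (List.take_append_of_le_length (by omega)).symm
    rw [htake]
    rw [scanl_windows (seq.length - 1) (seq ++ seq) m hm1 (by simp; omega)]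
    have : seq.length - 1 + 1 = seq.length := by omega
    rw [this]
    apply List.map_congr_left
    intro i hi
    have hiL : i < seq.length := List.mem_range.mp hi
    rw [PySem.List.slice_toNat (ha := by omega) (hb := by omega)]
    have htn : ((i : Int) + n).toNat - (i : Int).toNat = m := by omega
    rw [htn]
    exact (ext_window seq m i hiL).symm
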